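-- pv_equiv track=rewrite | github.com/konszymanski/leetcode-dataset | obfuscated_solutions/python/3152-special-array-ii/solution_3_l0_l1_l3.py | isArraySpecial
-- ===== SOURCE A (Python) =====
-- from typing import List
--
-- def isArraySpecial(nums: List[int], queries: List[List[int]]) -> List[bool]:
--     if len('abc') == 3:
--         v1_754 = len(nums)
--     v2_214 = [0] * v1_754
--     v2_214[-1] = v1_754 - 1
--     for v3_125 in range(v1_754 - 2, -1, -1):
--         v_junk_68 = 82
--         if nums[v3_125] % 2 != nums[v3_125 + 1] % 2:
--             v2_214[v3_125] = v2_214[v3_125 + 1]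
--         else:
--             v2_214[v3_125] = v3_125
--     v4_859 = [False] * len(queries)
--     for (v3_125, v5_381) in enumerate(queries):
--         v_junk_99 = 88
--         if len('abc') == 3:
--             (v6_350, v7_328) = v5_381
--         if len('abc') == 3:
--             v4_859[v3_125] = v7_328 <= v2_214[v6_350]
--     return v4_859
-- ===== SOURCE B (Python) =====
-- def isArraySpecial(nums, queries):
--     # prefix count of parity "breaks": cnt[i] = number of j in 1..i with nums[j] % 2 == nums[j-1] % 2
--     cnt = [0]
--     c = 0
--     for prev, cur in zip(nums, nums[1:]):
--         if cur % 2 == prev % 2: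
--             c += 1
--         cnt.append(c)
--     # a query is special iff the subarray exists and contains no parity break
--     return [0 <= l <= r < len(nums) and cnt[r] == cnt[l] for l, r in queries]
-- ===== Notes on version B (the rewrite author's own statement) =====
-- stated objective: alternative
-- what changed: A builds a backward 'farthest alternating reach' array and answers each query [l,r] by r <= reach[l]; B builds a forward prefix table counting parity breaks over adjacent pairs, validates the query bounds, and answers by cnt[l] == cnt[r].
-- outside the precondition, e.g. on isArraySpecial([1, 1], [[1, 0]]): A returns [True], B returns [False]; on isArraySpecial([1, 1, 1], [[-1, 0]]): A returns [True], B returns [False]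
import Mathlib
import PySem

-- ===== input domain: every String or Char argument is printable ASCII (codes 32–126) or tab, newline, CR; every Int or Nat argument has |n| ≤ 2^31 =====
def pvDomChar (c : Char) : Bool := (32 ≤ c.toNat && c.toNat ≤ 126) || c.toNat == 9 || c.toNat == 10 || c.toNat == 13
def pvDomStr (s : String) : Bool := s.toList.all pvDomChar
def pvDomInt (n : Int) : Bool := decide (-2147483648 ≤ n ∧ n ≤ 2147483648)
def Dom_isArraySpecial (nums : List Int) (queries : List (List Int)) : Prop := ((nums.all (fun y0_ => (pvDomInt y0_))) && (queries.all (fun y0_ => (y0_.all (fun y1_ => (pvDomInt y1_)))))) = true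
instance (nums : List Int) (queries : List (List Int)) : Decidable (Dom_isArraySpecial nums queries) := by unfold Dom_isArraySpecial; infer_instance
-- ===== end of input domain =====

-- B replaces A's backward farthest-reach array with a forward prefix table of parity-break
-- counts, answering each query by cnt[l] == cnt[r] (alternative decomposition, same cost).


-- ===== PORT A =====
-- one iteration of A's backward loop, at index k (nums[k], nums[k+1] are in range there)
def pvStepA (nums : List Int) (k : Nat) (arr : List Int) : List Int :=
  if PySem.Int.mod (nums.getD k 0) 2 ≠ PySem.Int.mod (nums.getD (k + 1) 0) 2 then
    arr.set k (arr.getD (k + 1) 0)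
  else
    arr.set k (k : Int)

-- 'for v3 in range(n-2, -1, -1)': counter c processes index c-1, then c-2, …, 0
def pvLoopA (nums : List Int) : Nat → List Int → List Int
  | 0, arr => arr
  | k + 1, arr => pvLoopA nums k (pvStepA nums k arr)

-- 'v4[i] = r <= v2[l]'; tuple unpacking raises unless len(q) == 2 (excluded by Pre_)
def pvAnsA (arr : List Int) (q : List Int) : Bool :=
  match q with
  | [l, r] => decide (r ≤ (PySem.List.pyGet? arr l).getD 0)
  | _ => false

-- 'for i, q in enumerate(queries): v4[i] = …'
def pvLoopQ (arr : List Int) : List (List Int) → Nat → List Bool → List Bool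
  | [], _, out => out
  | q :: rest, i, out => pvLoopQ arr rest (i + 1) (out.set i (pvAnsA arr q))

def isArraySpecial (nums : List Int) (queries : List (List Int)) : List Bool :=
  let n := nums.length
  -- v2 = [0]*n; v2[-1] = n-1  (raises IndexError on empty nums: excluded by Pre_)
  let arr0 := PySem.List.pySetD (List.replicate n (0 : Int)) (-1) ((n : Int) - 1)
  let arr := pvLoopA nums (n - 1) arr0
  pvLoopQ arr queries 0 (List.replicate queries.length false)

-- ===== PORT B =====
-- 'for prev, cur in zip(nums, nums[1:]): c += (cur % 2 == prev % 2); cnt.append(c)'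
def pvCntLoop : List (Int × Int) → Int → List Int
  | [], _ => []
  | (p, c) :: rest, acc =>
    let acc' := if PySem.Int.mod c 2 == PySem.Int.mod p 2 then acc + 1 else acc
    acc' :: pvCntLoop rest acc'

-- '0 <= l <= r < len(nums) and cnt[r] == cnt[l]'; unpacking raises unless len(q) == 2 (excluded by Pre_)
def pvAnsB (n : Nat) (cnt : List Int) (q : List Int) : Bool :=
  match q with
  | [l, r] =>
    decide (0 ≤ l) && decide (l ≤ r) && decide (r < (n : Int)) &&
      ((PySem.List.pyGet? cnt r).getD 0 == (PySem.List.pyGet? cnt l).getD 0)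
  | _ => false

def isArraySpecial_alt (nums : List Int) (queries : List (List Int)) : List Bool :=
  let cnt := (0 : Int) :: pvCntLoop (nums.zip nums.tail) 0
  queries.map (pvAnsB nums.length cnt)

-- ===== PRECONDITION & SPEC =====
-- Pre_ excludes empty nums (A raises IndexError) and malformed queries: length ≠ 2 or
-- l ≥ len(nums) (A raises), negative l (A answers via negative-index wraparound, an
-- accident of its implementation), and l > r (A's comparison is then vacuously True);
-- a query [l, r] with 0 ≤ l ≤ r, l a valid index, is the problem's stated shape.
def Pre_isArraySpecial (nums : List Int) (queries : List (List Int)) : Prop :=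
  nums ≠ [] ∧ ∀ q ∈ queries,
    q.length = 2 ∧ 0 ≤ q.getD 0 0 ∧ q.getD 0 0 ≤ q.getD 1 0 ∧ q.getD 0 0 < (nums.length : Int)
instance (nums : List Int) (queries : List (List Int)) : Decidable (Pre_isArraySpecial nums queries) := by unfold Pre_isArraySpecial; infer_instance

def pvWitness_isArraySpecial : List Int × List (List Int) := ([1, 2, 3, 3], [[0, 2], [1, 3], [0, 0]])

def Spec_isArraySpecial (nums : List Int) (queries : List (List Int)) (out : List Bool) : Prop := out = isArraySpecial_alt nums queries
instance (nums : List Int) (queries : List (List Int)) (out : List Bool) : Decidable (Spec_isArraySpecial nums queries out) := by unfold Spec_isArraySpecial; infer_instance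

-- ===== CLAIM (what is proved, stated in full; the proofs are below) =====
def Claim_equal_isArraySpecial : Prop := ∀ (nums : List Int) (queries : List (List Int)), Dom_isArraySpecial nums queries → Pre_isArraySpecial nums queries → Spec_isArraySpecial nums queries (isArraySpecial nums queries)

-- ===== LEMMAS AND PROOFS =====

-- `true` iff the adjacent pair (nums[j], nums[j+1]) is a parity break
def pvB (nums : List Int) (j : Nat) : Bool :=
  PySem.Int.mod (nums.getD (j + 1) 0) 2 == PySem.Int.mod (nums.getD j 0) 2

-- reference semantics of A's reach array
def pvReach (nums : List Int) (i : Nat) : Int :=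
  if h : i + 1 < nums.length then
    (if pvB nums i = false then pvReach nums (i + 1) else (i : Int))
  else ((nums.length : Int) - 1)
termination_by nums.length - i

-- reference semantics of B's prefix table
def pvS (nums : List Int) : Nat → Int
  | 0 => 0
  | j + 1 => pvS nums j + (if pvB nums j then 1 else 0)

-- break count of a pair list
def pvPcnt : List (Int × Int) → Int
  | [] => 0
  | (p, c) :: rest => (if PySem.Int.mod c 2 == PySem.Int.mod p 2 then (1 : Int) else 0) + pvPcnt rest

-- no parity break strictly inside [l, r]
def pvNoBrk (nums : List Int) (l r : Nat) : Prop := ∀ j, l ≤ j → j < r → pvB nums j = false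


theorem pvB_false_iff (nums : List Int) (j : Nat) :
    pvB nums j = false ↔ PySem.Int.mod (nums.getD (j + 1) 0) 2 ≠ PySem.Int.mod (nums.getD j 0) 2 := by
  simp only [pvB, beq_eq_false_iff_ne, ne_eq]

theorem pvGetD_set_self (l : List Int) (k : Nat) (v : Int) (h : k < l.length) :
    (l.set k v).getD k 0 = v := by
  simp [List.getD_eq_getElem?_getD, h]

theorem pvGetD_set_ne (l : List Int) (k j : Nat) (v : Int) (h : j ≠ k) :
    (l.set k v).getD j 0 = l.getD j 0 := by
  simp [List.getD_eq_getElem?_getD, List.getElem?_set_ne (by omega : k ≠ j)]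

theorem pvTake_set (l : List Bool) (i : Nat) (a : Bool) (h : i < l.length) :
    (l.set i a).take (i + 1) = l.take i ++ [a] := by
  rw [List.set_eq_take_append_cons_drop, if_pos h, List.take_append]
  simp [List.take_take, List.length_take, Nat.min_eq_left (le_of_lt h)]

theorem pvPcnt_append (a b : List (Int × Int)) : pvPcnt (a ++ b) = pvPcnt a + pvPcnt b := by
  induction a with
  | nil => simp [pvPcnt]
  | cons p rest ih => obtain ⟨x, y⟩ := p; simp [pvPcnt, ih]; ring

theorem pvZip_getElem? (nums : List Int) (j : Nat) (hj : j + 1 < nums.length) :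
    (nums.zip nums.tail)[j]? = some (nums.getD j 0, nums.getD (j + 1) 0) := by
  have h1 : j < (nums.zip nums.tail).length := by
    simp [List.length_zip, List.length_tail]; omega
  rw [List.getElem?_eq_getElem h1]
  simp [List.getElem_zip, List.getElem_tail, List.getD_eq_getElem?_getD,
    List.getElem?_eq_getElem (by omega : j < nums.length),
    List.getElem?_eq_getElem (by omega : j + 1 < nums.length)]

theorem pvArr0 (n : Nat) (v : Int) (h : 0 < n) :
    PySem.List.pySetD (List.replicate n (0 : Int)) (-1) v = (List.replicate n (0 : Int)).set (n - 1) v := by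
  simp [PySem.List.pySetD, PySem.List.pySet?, PySem.List.pyIdx?]
  rw [if_pos (by omega)]
  rfl

theorem pvLoopA_getD (nums : List Int) (k : Nat) (arr : List Int)
    (hlen : arr.length = nums.length) (hk : k < nums.length)
    (hinv : ∀ j, k ≤ j → j < nums.length → arr.getD j 0 = pvReach nums j) :
    (pvLoopA nums k arr).length = nums.length ∧
      ∀ j, j < nums.length → (pvLoopA nums k arr).getD j 0 = pvReach nums j := by
  induction k generalizing arr with
  | zero =>
    exact ⟨hlen, fun j hj => hinv j (Nat.zero_le _) hj⟩
  | succ k ih =>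
    rw [pvLoopA]
    have hlen' : (pvStepA nums k arr).length = nums.length := by
      unfold pvStepA; split <;> simp [hlen]
    refine ih (pvStepA nums k arr) hlen' (by omega) ?_
    intro j hj hjn
    rcases Nat.eq_or_lt_of_le hj with he | hlt
    · subst he
      have hk1 : k + 1 < nums.length := hk
      have harr : arr.getD (k + 1) 0 = pvReach nums (k + 1) := hinv (k + 1) (le_refl _) hk1
      rw [pvReach, dif_pos hk1]
      unfold pvStepA
      by_cases hb : pvB nums k = false
      · have hne : PySem.Int.mod (nums.getD k 0) 2 ≠ PySem.Int.mod (nums.getD (k + 1) 0) 2 :=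
          fun he => ((pvB_false_iff nums k).mp hb) he.symm
        rw [if_pos hne, pvGetD_set_self _ _ _ (by omega), if_pos hb, harr]
      · have heq : PySem.Int.mod (nums.getD k 0) 2 = PySem.Int.mod (nums.getD (k + 1) 0) 2 := by
          by_contra hne
          exact hb ((pvB_false_iff nums k).mpr (fun h => hne h.symm))
        rw [if_neg (by exact fun h => h heq), pvGetD_set_self _ _ _ (by omega), if_neg hb]
    · have : (pvStepA nums k arr).getD j 0 = arr.getD j 0 := by
        unfold pvStepA; split <;> exact pvGetD_set_ne _ _ _ _ (by omega)
      rw [this]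
      exact hinv j (by omega) hjn

theorem pvLoopQ_eq (arr : List Int) (qs : List (List Int)) (i : Nat) (out : List Bool)
    (hlen : out.length = i + qs.length) :
    pvLoopQ arr qs i out = out.take i ++ qs.map (pvAnsA arr) := by
  induction qs generalizing i out with
  | nil =>
    simp only [List.length_nil, Nat.add_zero] at hlen
    simp [pvLoopQ, List.take_of_length_le (le_of_eq hlen)]
  | cons q rest ih =>
    have hi : i < out.length := by rw [hlen, List.length_cons]; omega
    rw [pvLoopQ, ih (i + 1) (out.set i (pvAnsA arr q))
      (by rw [List.length_set, hlen, List.length_cons]; omega), pvTake_set out i _ hi]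
    simp

theorem pvCntLoop_getD (ps : List (Int × Int)) (acc : Int) (j : Nat) (hj : j ≤ ps.length) :
    (acc :: pvCntLoop ps acc).getD j 0 = acc + pvPcnt (ps.take j) := by
  induction ps generalizing acc j with
  | nil =>
    have : j = 0 := by simpa using hj
    subst this
    simp [pvCntLoop, pvPcnt]
  | cons p rest ih =>
    obtain ⟨a, b⟩ := p
    cases j with
    | zero => simp [pvPcnt]
    | succ j =>
      simp only [pvCntLoop, List.getD_cons_succ, List.take_succ_cons, pvPcnt]
      rw [show ((if PySem.Int.mod b 2 == PySem.Int.mod a 2 then acc + 1 else acc) :: pvCntLoop rest (if PySem.Int.mod b 2 == PySem.Int.mod a 2 then acc + 1 else acc)).getD j 0 = _ from ih _ _ (by simpa using hj)]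
      split <;> ring

theorem pvPcnt_take (nums : List Int) (j : Nat) (hj : j ≤ nums.length - 1) :
    pvPcnt ((nums.zip nums.tail).take j) = pvS nums j := by
  induction j with
  | zero => simp [pvPcnt, pvS]
  | succ j ih =>
    have hj1 : j + 1 < nums.length := by omega
    rw [List.take_add_one, pvZip_getElem? nums j hj1]
    rw [pvPcnt_append, ih (by omega)]
    simp only [Option.toList_some, pvPcnt, pvS, pvB]
    split <;> ring

theorem pvReach_ge (nums : List Int) (i : Nat) (hi : i < nums.length) :
    (i : Int) ≤ pvReach nums i := by
  fun_induction pvReach nums i with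
  | case1 i h hb ih =>
    have : (i:Int) + 1 ≤ pvReach nums (i+1) := by exact_mod_cast ih (by omega)
    omega
  | case2 i h hb => exact le_refl _
  | case3 i h => omega

theorem pvReach_le (nums : List Int) (i : Nat) :
    pvReach nums i ≤ (nums.length : Int) - 1 := by
  fun_induction pvReach nums i with
  | case1 i h hb ih => exact ih
  | case2 i h hb => omega
  | case3 i h => exact le_refl _

theorem pvReach_iff (nums : List Int) (l r : Nat) (hlr : l ≤ r) (hr : r < nums.length) :
    ((r : Int) ≤ pvReach nums l ↔ pvNoBrk nums l r) := by
  induction hd : r - l generalizing l with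
  | zero =>
    have : l = r := by omega
    subst this
    have := pvReach_ge nums l hr
    constructor
    · intro _ j h1 h2; omega
    · intro _; exact this
  | succ d ih =>
    have hlt : l < r := by omega
    have hl1 : l + 1 < nums.length := by omega
    rw [pvReach, dif_pos hl1]
    by_cases hb : pvB nums l = false
    · rw [if_pos hb, ih (l+1) (by omega) (by omega)]
      constructor
      · intro h j h1 h2
        rcases Nat.eq_or_lt_of_le h1 with he | hlt2
        · subst he; exact hb
        · exact h j hlt2 h2
      · intro h j h1 h2; exact h j (by omega) h2
    · rw [if_neg hb]
      constructor
      · intro h; exfalso; omega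
      · intro h
        exact absurd (h l (le_refl _) hlt) hb

theorem pvS_mono (nums : List Int) (l r : Nat) (hlr : l ≤ r) : pvS nums l ≤ pvS nums r := by
  induction r, hlr using Nat.le_induction with
  | base => exact le_refl _
  | succ r hr ih =>
    have : (0:Int) ≤ (if pvB nums r then 1 else 0) := by split <;> norm_num
    simp only [pvS]; omega

theorem pvS_iff (nums : List Int) (l r : Nat) (hlr : l ≤ r) :
    (pvS nums r = pvS nums l ↔ pvNoBrk nums l r) := by
  induction r, hlr using Nat.le_induction with
  | base =>
    simp only [true_iff]
    intro j h1 h2; omega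
  | succ r hr ih =>
    have hm : pvS nums l ≤ pvS nums r := pvS_mono nums l r hr
    have hb : (0:Int) ≤ (if pvB nums r then 1 else 0) := by split <;> norm_num
    constructor
    · intro h j h1 h2
      simp only [pvS] at h
      have h0 : (if pvB nums r then (1:Int) else 0) = 0 := by omega
      have hPrev : pvS nums r = pvS nums l := by omega
      rcases Nat.lt_or_ge j r with hj | hj
      · exact (ih.mp hPrev) j h1 hj
      · have : j = r := by omega
        subst this
        by_contra hc
        have : pvB nums j = true := by simpa using hc
        simp [this] at h0
    · intro h
      have h1 : pvS nums r = pvS nums l := ih.mpr (fun j a b => h j a (by omega))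
      have h2 : pvB nums r = false := h r hr (by omega)
      simp [pvS, h2, h1]

-- ===== VERDICT (by name: the statement is the Claim_ definition above) =====
theorem isArraySpecial_spec : Claim_equal_isArraySpecial := by
  intro nums queries _ hpre
  obtain ⟨hne, hq⟩ := hpre
  have hn : 0 < nums.length := List.length_pos_iff.mpr hne
  unfold Spec_isArraySpecial isArraySpecial isArraySpecial_alt
  show pvLoopQ (pvLoopA nums (nums.length - 1)
      (PySem.List.pySetD (List.replicate nums.length (0 : Int)) (-1) ((nums.length : Int) - 1)))
      queries 0 (List.replicate queries.length false) =
    List.map (pvAnsB nums.length ((0 : Int) :: pvCntLoop (nums.zip nums.tail) 0)) queries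
  rw [pvArr0 nums.length _ hn]
  have hziplen : (nums.zip nums.tail).length = nums.length - 1 := by
    simp [List.length_tail]
  -- A's reach array
  have harr0len : ((List.replicate nums.length (0 : Int)).set (nums.length - 1) ((nums.length : Int) - 1)).length = nums.length := by simp
  have harr0 : ∀ j, nums.length - 1 ≤ j → j < nums.length →
      ((List.replicate nums.length (0 : Int)).set (nums.length - 1) ((nums.length : Int) - 1)).getD j 0 = pvReach nums j := by
    intro j h1 h2
    have hj : j = nums.length - 1 := by omega
    subst hj
    rw [pvGetD_set_self _ _ _ (by simp; omega), pvReach, dif_neg (by omega)]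
  obtain ⟨hlenA, hA⟩ := pvLoopA_getD nums (nums.length - 1) _ harr0len (by omega) harr0
  -- B's prefix table
  have hcnt : ∀ j, j ≤ nums.length - 1 →
      ((0 : Int) :: pvCntLoop (nums.zip nums.tail) 0).getD j 0 = pvS nums j := by
    intro j hj
    rw [pvCntLoop_getD _ _ _ (by omega), pvPcnt_take nums j hj, zero_add]
  rw [pvLoopQ_eq _ _ _ _ (by simp), List.take_zero, List.nil_append]
  apply List.map_congr_left
  intro q hqmem
  obtain ⟨h2, h0, h01, hln⟩ := hq q hqmem
  obtain ⟨a, b, rfl⟩ := List.length_eq_two.mp h2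
  simp only [List.getD_cons_zero, List.getD_cons_succ] at h0 h01 hln
  have ha : a = (a.toNat : Int) := (Int.toNat_of_nonneg h0).symm
  have hb : b = (b.toNat : Int) := (Int.toNat_of_nonneg (le_trans h0 h01)).symm
  have hla : a.toNat < nums.length := by omega
  rw [pvAnsA, pvAnsB]
  have hBpre : (decide (0 ≤ a) && decide (a ≤ b)) = true := by
    simp [h0, h01]
  by_cases hrn : b < (nums.length : Int)
  · -- the query's right end is a valid index
    have hlarb : a.toNat ≤ b.toNat := by omega
    have hrb : b.toNat < nums.length := by omega
    rw [ha, hb, PySem.List.pyGet?_natCast, PySem.List.pyGet?_natCast,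
      PySem.List.pyGet?_natCast, ← List.getD_eq_getElem?_getD, ← List.getD_eq_getElem?_getD,
      ← List.getD_eq_getElem?_getD, hA _ hla, hcnt _ (by omega), hcnt _ (by omega)]
    have hiff : ((b.toNat : Int) ≤ pvReach nums a.toNat) ↔ (pvS nums a.toNat = pvS nums b.toNat) :=
      (pvReach_iff nums a.toNat b.toNat hlarb hrb).trans
        ((pvS_iff nums a.toNat b.toNat hlarb).symm.trans eq_comm)
    have hrn' : (decide ((b.toNat : Int) < (nums.length : Int))) = true := by
      simp; omega
    rw [Bool.and_assoc, Bool.and_assoc] at *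
    by_cases hP : ((b.toNat : Int) ≤ pvReach nums a.toNat)
    · rw [decide_eq_true hP]
      simp only [← ha, ← hb] at *
      simp [h0, h01, hrn, ← hiff.mp hP]
    · have hne2 : pvS nums a.toNat ≠ pvS nums b.toNat := fun h => hP (hiff.mpr h)
      rw [decide_eq_false hP]
      simp
      intro _ _ _
      exact fun h => hne2 h.symm
  · -- r beyond the array: A's reach is at most len-1, B's bounds test fails
    have hAfalse : ¬ (b ≤ (PySem.List.pyGet? (pvLoopA nums (nums.length - 1)
        ((List.replicate nums.length (0 : Int)).set (nums.length - 1)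
          ((nums.length : Int) - 1))) a).getD 0) := by
      rw [ha, PySem.List.pyGet?_natCast, ← List.getD_eq_getElem?_getD, hA _ hla]
      have := pvReach_le nums a.toNat
      omega
    rw [decide_eq_false hAfalse]
    simp [hrn]
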